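-- pv_equiv track=rewrite | github.com/Joshuaisikah/Joshuaisikah | generate_snake.py | compute_states
-- ===== SOURCE A (Python) =====
-- INIT_LEN       = 5
--
-- MAX_LEN        = 22
--
-- GROWTH_SCALE   = 0.5
--
-- def compute_states(grid, path):
--     states, snake, target = [], [], INIT_LEN
--     for col, row in path:
--         count = grid[col][row] if col < len(grid) and row < len(grid[col]) else 0
--         snake = [(col, row)] + snake
--         if count > 0:
--             target = min(MAX_LEN, target + max(1, int(count * GROWTH_SCALE)))
--         while len(snake) > target:
--             snake.pop()
--         states.append(list(snake))
--     return states
-- ===== SOURCE B (Python) =====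
-- INIT_LEN       = 5
--
-- MAX_LEN        = 22
--
-- GROWTH_SCALE   = 0.5
--
-- def compute_states(grid, path):
--     states, target, L = [], INIT_LEN, 0
--     for i, (col, row) in enumerate(path):
--         count = grid[col][row] if col < len(grid) and row < len(grid[col]) else 0
--         if count > 0:
--             target = min(MAX_LEN, target + max(1, int(count * GROWTH_SCALE)))
--         L = min(L + 1, target)
--         states.append(list(reversed(path[i - L + 1:i + 1])))
--     return states
-- ===== Notes on version B (the rewrite author's own statement) =====
-- stated objective: simpler
-- what changed: Drops the maintained snake list and its pop-while loop: one pass keeps only two integers (target and current length L = min(L+1, target)), and each state is rebuilt as the reversed slice path[i-L+1:i+1] of the input path.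
import Mathlib
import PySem

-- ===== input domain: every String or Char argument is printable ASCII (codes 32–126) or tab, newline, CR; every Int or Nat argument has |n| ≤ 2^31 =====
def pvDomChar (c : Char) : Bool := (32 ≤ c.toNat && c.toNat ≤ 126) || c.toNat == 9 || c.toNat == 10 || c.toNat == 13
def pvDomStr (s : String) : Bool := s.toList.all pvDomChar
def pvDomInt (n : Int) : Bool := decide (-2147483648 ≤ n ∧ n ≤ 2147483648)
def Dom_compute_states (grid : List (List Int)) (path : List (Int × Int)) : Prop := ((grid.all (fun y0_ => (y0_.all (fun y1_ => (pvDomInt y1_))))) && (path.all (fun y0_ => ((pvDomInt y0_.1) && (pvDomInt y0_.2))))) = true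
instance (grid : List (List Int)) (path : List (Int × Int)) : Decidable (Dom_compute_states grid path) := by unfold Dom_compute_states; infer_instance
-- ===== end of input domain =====

-- B replaces A's maintained snake list and pop-while loop by two running integers
-- (target, length L) and rebuilds each state as a reversed slice of the path (objective: simpler).

-- ===== PORT A =====
-- shared lookup helper: `grid[col][row] if col < len(grid) and row < len(grid[col]) else 0`
-- (pyGet? = none is the IndexError case; Pre_ excludes it, the 0 default there is junk)
def cellCount (grid : List (List Int)) (col row : Int) : Int :=
  if col < (grid.length : Int) then
    match PySem.List.pyGet? grid col with
    | none => 0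
    | some rowL =>
      if row < (rowL.length : Int) then (PySem.List.pyGet? rowL row).getD 0 else 0
  else 0

-- `while len(snake) > target: snake.pop()`  (the ≠ [] guard only makes the loop total;
-- it never fires on A's actual states, where target ≥ 5)
def popLoop (snake : List (Int × Int)) (target : Int) : List (Int × Int) :=
  if h : snake ≠ [] ∧ target < (snake.length : Int) then popLoop snake.dropLast target
  else snake
termination_by snake.length
decreasing_by
  have h1 := h.1
  have : snake.length ≠ 0 := by simpa using h1
  simp [List.length_dropLast]; omega

def aLoop (grid : List (List Int)) :
    List (Int × Int) → List (List (Int × Int)) × List (Int × Int) × Int →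
    List (List (Int × Int)) × List (Int × Int) × Int
  | [], st => st
  | cr :: rest, (states, snake, target) =>
      let count := cellCount grid cr.1 cr.2
      let snake1 := cr :: snake
      let target1 := if count > 0 then
          min 22 (target + max 1 (PySem.Int.floordiv count 2)) else target
      let snake2 := popLoop snake1 target1
      aLoop grid rest (states ++ [snake2], snake2, target1)

def compute_states (grid : List (List Int)) (path : List (Int × Int)) : List (List (Int × Int)) :=
  (aLoop grid path ([], [], 5)).1

-- ===== PORT B =====
-- the `for i, (col, row) in enumerate(path)` loop of Source B, carrying (states, target, L)
def altLoop (grid : List (List Int)) (path : List (Int × Int)) :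
    List (Int × Int) → Nat → List (List (Int × Int)) × Int × Int →
    List (List (Int × Int)) × Int × Int
  | [], _, st => st
  | cr :: rest, i, (states, target, L) =>
      let count := cellCount grid cr.1 cr.2
      let target1 := if count > 0 then
          min 22 (target + max 1 (PySem.Int.floordiv count 2)) else target
      let L1 := min (L + 1) target1
      altLoop grid path rest (i + 1)
        (states ++ [(PySem.List.slice path (some ((i : Int) - L1 + 1)) (some ((i : Int) + 1))).reverse],
         target1, L1)

def compute_states_alt (grid : List (List Int)) (path : List (Int × Int)) : List (List (Int × Int)) :=
  (altLoop grid path path 0 ([], 5, 0)).1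

-- ===== PRECONDITION & SPEC =====
-- Pre_ excludes exactly the inputs on which Python A raises IndexError: a coordinate whose
-- negative col (or row) passes the `< len` guard but wraps past the front of the list.
def Pre_compute_states (grid : List (List Int)) (path : List (Int × Int)) : Prop :=
  ∀ cr ∈ path, cr.1 < (grid.length : Int) →
    (PySem.List.pyGet? grid cr.1).isSome = true ∧
    ∀ rowL ∈ PySem.List.pyGet? grid cr.1, cr.2 < (rowL.length : Int) →
      (PySem.List.pyGet? rowL cr.2).isSome = true
instance (grid : List (List Int)) (path : List (Int × Int)) : Decidable (Pre_compute_states grid path) := by unfold Pre_compute_states; infer_instance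
def pvWitness_compute_states : List (List Int) × (List (Int × Int)) := ([[3, 0], [1]], [(0, 0), (0, 1), (1, 0), (2, 5)])
def Spec_compute_states (grid : List (List Int)) (path : List (Int × Int)) (out : List (List (Int × Int))) : Prop := out = compute_states_alt grid path
instance (grid : List (List Int)) (path : List (Int × Int)) (out : List (List (Int × Int))) : Decidable (Spec_compute_states grid path out) := by unfold Spec_compute_states; infer_instance

-- ===== CLAIM (what is proved, stated in full; the proofs are below) =====
def Claim_equal_compute_states : Prop := ∀ (grid : List (List Int)) (path : List (Int × Int)), Dom_compute_states grid path → Pre_compute_states grid path → Spec_compute_states grid path (compute_states grid path)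

-- ===== LEMMAS AND PROOFS =====

lemma popLoop_eq_take (snake : List (Int × Int)) (target : Int) (ht : 0 ≤ target) :
    popLoop snake target = snake.take target.toNat := by
  induction snake using popLoop.induct target with
  | case1 snake h ih =>
      rw [popLoop, dif_pos h]
      rw [ih, List.dropLast_eq_take, List.take_take]
      congr 1
      omega
  | case2 snake h =>
      rw [popLoop, dif_neg h]
      rcases snake with _ | ⟨a, l⟩
      · simp
      · have hle : ¬ target < ((a :: l).length : Int) := fun hlt => h ⟨by simp, hlt⟩
        rw [List.take_of_length_le]
        omega

lemma loop_eq (grid : List (List Int)) (path : List (Int × Int)) :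
    ∀ (rest p : List (Int × Int)) (states : List (List (Int × Int))) (target L : Int),
      path = p ++ rest → 0 ≤ L → L ≤ (p.length : Int) → L ≤ target → 5 ≤ target →
      (aLoop grid rest (states, p.reverse.take L.toNat, target)).1
        = (altLoop grid path rest p.length (states, target, L)).1 := by
  intro rest
  induction rest with
  | nil => intro p states target L _ _ _ _ _; rfl
  | cons cr rest ih =>
      intro p states target L hpath hL0 hLp hLt ht5
      simp only [aLoop, altLoop]
      set count := cellCount grid cr.1 cr.2 with hc
      set t1 := if count > 0 then min 22 (target + max 1 (PySem.Int.floordiv count 2)) else target with ht1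
      have ht1_5 : 5 ≤ t1 := by
        rw [ht1]; split_ifs with h
        · have : 0 < count := h
          have hfd : 0 ≤ PySem.Int.floordiv count 2 := by
            have := PySem.Int.floordiv_nonneg (a := count) (b := 2) (by omega) (by omega)
            exact this
          omega
        · exact ht5
      set L1 := min (L + 1) t1 with hL1
      have hL1pos : 0 < L1 := by omega
      have hL1le : L1 ≤ (p.length : Int) + 1 := by omega
      -- the popped snake is the first L1 of (cr :: p.reverse)
      have hsnake : popLoop (cr :: p.reverse.take L.toNat) t1 = (cr :: p.reverse).take L1.toNat := by
        rw [popLoop_eq_take _ _ (by omega)]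
        have h1 : cr :: p.reverse.take L.toNat = (cr :: p.reverse).take (L.toNat + 1) := by
          simp [List.take_succ_cons]
        rw [h1, List.take_take]
        congr 1
        omega
      -- B's slice equals the same list
      have hslice :
          (PySem.List.slice path (some ((p.length : Int) - L1 + 1)) (some ((p.length : Int) + 1))).reverse
            = (cr :: p.reverse).take L1.toNat := by
        rw [PySem.List.slice_toNat _ (by omega) (by omega)]
        have hk : ((p.length : Int) - L1 + 1).toNat = p.length + 1 - L1.toNat := by omega
        have hb : ((p.length : Int) + 1).toNat - ((p.length : Int) - L1 + 1).toNat = L1.toNat := by omega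
        rw [hb, hk, hpath]
        have hsplit : (p ++ cr :: rest) = (p ++ [cr]) ++ rest := by simp
        have hlen1 : (p ++ [cr]).length = p.length + 1 := by simp
        rw [hsplit, List.drop_append_of_le_length (by omega)]
        rw [List.take_append_of_le_length (by simp only [List.length_drop]; omega)]
        rw [List.take_of_length_le (by simp only [List.length_drop]; omega)]
        rw [List.reverse_drop]
        simp only [List.reverse_append, List.reverse_cons, List.reverse_nil,
          List.nil_append, List.singleton_append, List.length_append, List.length_cons,
          List.length_nil]
        congr 1
        omega
      rw [hsnake, hslice]
      have := ih (p ++ [cr]) (states ++ [(cr :: p.reverse).take L1.toNat]) t1 L1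
        (by rw [hpath]; simp) (by omega) (by simp; omega) (by omega) ht1_5
      simpa using this
  
theorem compute_states_spec : Claim_equal_compute_states := by
  intro grid path _ _
  unfold Spec_compute_states compute_states compute_states_alt
  have := loop_eq grid path path [] [] 5 0 rfl (by omega) (by simp) (by omega) (by omega)
  simpa using this
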